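-- pv_equiv track=rewrite | github.com/wei313511022/DFJSSP | GA_code/GA_plot_routing.py | _manhattan_path
-- ===== SOURCE A (Python) =====
-- from typing import Dict, List, Optional, Tuple
--
-- def _manhattan_path(start: Tuple[int, int], end: Tuple[int, int]) -> List[Tuple[int, int]]:
--     path = [start]
--     x, y = start
--     tx, ty = end
--     dx = 1 if tx > x else -1
--     while x != tx:
--         x += dx
--         path.append((x, y))
--     dy = 1 if ty > y else -1
--     while y != ty:
--         y += dy
--         path.append((x, y))
--     return path
-- ===== SOURCE B (Python) =====
-- from typing import Dict, List, Optional, Tuple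
--
-- def _manhattan_path(start: Tuple[int, int], end: Tuple[int, int]) -> List[Tuple[int, int]]:
--     # Closed-form: the i-th point of the path is computed directly from the index i
--     # (clamp i to the x-leg length for the x coordinate, the surplus drives y).
--     (x0, y0), (tx, ty) = start, end
--     ax, ay = abs(tx - x0), abs(ty - y0)
--     sx = 1 if tx > x0 else -1
--     sy = 1 if ty > y0 else -1
--     return [(x0 + sx * min(i, ax), y0 + sy * max(i - ax, 0)) for i in range(ax + ay + 1)]
-- ===== Notes on version B (the rewrite author's own statement) =====
-- stated objective: alternative
-- what changed: Replaced A's two stateful while-loops (walk x, then walk y) by a single closed-form index formula: the i-th point is computed arithmetically from i (clamping i to the x-leg length) over one range of path indices.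
import Mathlib
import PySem

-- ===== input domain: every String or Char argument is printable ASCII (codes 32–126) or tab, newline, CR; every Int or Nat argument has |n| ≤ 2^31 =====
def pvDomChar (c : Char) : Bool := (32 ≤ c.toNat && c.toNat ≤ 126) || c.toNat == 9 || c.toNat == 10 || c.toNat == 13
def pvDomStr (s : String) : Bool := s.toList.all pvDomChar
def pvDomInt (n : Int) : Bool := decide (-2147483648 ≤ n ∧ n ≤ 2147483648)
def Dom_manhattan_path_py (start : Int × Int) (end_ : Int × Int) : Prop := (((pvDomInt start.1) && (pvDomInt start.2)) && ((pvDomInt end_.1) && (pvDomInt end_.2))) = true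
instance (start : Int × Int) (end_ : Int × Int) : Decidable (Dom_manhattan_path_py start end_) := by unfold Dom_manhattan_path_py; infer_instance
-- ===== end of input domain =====

-- B replaces A's two stateful while-loops by a single closed-form index formula over one range (objective: alternative).


-- ===== PORT A =====
-- first while-loop: advances x by dx until x = tx, appending (x, y); fuel = |tx - x| iterations (exact: dx points toward tx whenever the loop runs)
def pvLoopX (tx dx y : Int) : Nat → Int → List (Int × Int)
  | 0, _ => []
  | n+1, x => if x ≠ tx then (x + dx, y) :: pvLoopX tx dx y n (x + dx) else []

-- second while-loop: advances y by dy until y = ty, appending (x, y)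
def pvLoopY (ty dy x : Int) : Nat → Int → List (Int × Int)
  | 0, _ => []
  | n+1, y => if y ≠ ty then (x, y + dy) :: pvLoopY ty dy x n (y + dy) else []

def manhattan_path_py (start : Int × Int) (end_ : Int × Int) : List (Int × Int) :=
  let x := start.1
  let y := start.2
  let tx := end_.1
  let ty := end_.2
  let dx : Int := if tx > x then 1 else -1
  let leg1 := pvLoopX tx dx y (tx - x).natAbs x
  let dy : Int := if ty > y then 1 else -1
  let leg2 := pvLoopY ty dy tx (ty - y).natAbs y
  [start] ++ leg1 ++ leg2

-- ===== PORT B =====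
def manhattan_path_py_alt (start : Int × Int) (end_ : Int × Int) : List (Int × Int) :=
  let x0 := start.1
  let y0 := start.2
  let tx := end_.1
  let ty := end_.2
  let ax : Int := (tx - x0).natAbs
  let ay : Int := (ty - y0).natAbs
  let sx : Int := if tx > x0 then 1 else -1
  let sy : Int := if ty > y0 then 1 else -1
  (PySem.List.pyRange 0 (ax + ay + 1) 1).map
    (fun i => (x0 + sx * min i ax, y0 + sy * max (i - ax) 0))

-- ===== PRECONDITION & SPEC =====
def Spec_manhattan_path_py (start : Int × Int) (end_ : Int × Int) (out : List (Int × Int)) : Prop := out = manhattan_path_py_alt start end_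
instance (start : Int × Int) (end_ : Int × Int) (out : List (Int × Int)) : Decidable (Spec_manhattan_path_py start end_ out) := by unfold Spec_manhattan_path_py; infer_instance

-- ===== CLAIM (what is proved, stated in full; the proofs are below) =====
def Claim_equal_manhattan_path_py : Prop := ∀ (start : Int × Int) (end_ : Int × Int), Dom_manhattan_path_py start end_ → Spec_manhattan_path_py start end_ (manhattan_path_py start end_)

-- ===== LEMMAS AND PROOFS =====
-- A's loops expressed as maps over Python ranges (up / down, per axis)
theorem pvLoopX_up (tx y : Int) : ∀ (n : Nat) (x : Int), x ≤ tx → n = (tx - x).natAbs →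
    pvLoopX tx 1 y n x = (PySem.List.pyRange (x + 1) (tx + 1) 1).map (fun a => (a, y)) := by
  intro n
  induction n with
  | zero =>
    intro x hle hn
    have : x = tx := by omega
    subst this
    rw [PySem.List.pyRange_one_eq_nil (by omega)]
    rfl
  | succ n ih =>
    intro x hle hn
    have hlt : x < tx := by omega
    rw [PySem.List.pyRange_one_cons (by omega)]
    simp only [pvLoopX, if_pos (by omega : x ≠ tx), List.map_cons]
    exact congrArg _ (ih (x + 1) (by omega) (by omega))

theorem pvLoopX_down (tx y : Int) : ∀ (n : Nat) (x : Int), tx ≤ x → n = (tx - x).natAbs →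
    pvLoopX tx (-1) y n x = (PySem.List.pyRange (x + -1) (tx + -1) (-1)).map (fun a => (a, y)) := by
  intro n
  induction n with
  | zero =>
    intro x hle hn
    have : x = tx := by omega
    subst this
    rw [PySem.List.pyRange_neg_one_eq_nil (by omega)]
    rfl
  | succ n ih =>
    intro x hle hn
    have hlt : tx < x := by omega
    rw [PySem.List.pyRange_neg_one_cons (by omega)]
    simp only [pvLoopX, if_pos (by omega : x ≠ tx), List.map_cons]
    have := ih (x + -1) (by omega) (by omega)
    simpa [show x + -1 - 1 = x + -1 + -1 by ring] using congrArg (List.cons (x + -1, y)) this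

theorem pvLoopY_up (ty x : Int) : ∀ (n : Nat) (y : Int), y ≤ ty → n = (ty - y).natAbs →
    pvLoopY ty 1 x n y = (PySem.List.pyRange (y + 1) (ty + 1) 1).map (fun b => (x, b)) := by
  intro n
  induction n with
  | zero =>
    intro y hle hn
    have : y = ty := by omega
    subst this
    rw [PySem.List.pyRange_one_eq_nil (by omega)]
    rfl
  | succ n ih =>
    intro y hle hn
    have hlt : y < ty := by omega
    rw [PySem.List.pyRange_one_cons (by omega)]
    simp only [pvLoopY, if_pos (by omega : y ≠ ty), List.map_cons]
    exact congrArg _ (ih (y + 1) (by omega) (by omega))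

theorem pvLoopY_down (ty x : Int) : ∀ (n : Nat) (y : Int), ty ≤ y → n = (ty - y).natAbs →
    pvLoopY ty (-1) x n y = (PySem.List.pyRange (y + -1) (ty + -1) (-1)).map (fun b => (x, b)) := by
  intro n
  induction n with
  | zero =>
    intro y hle hn
    have : y = ty := by omega
    subst this
    rw [PySem.List.pyRange_neg_one_eq_nil (by omega)]
    rfl
  | succ n ih =>
    intro y hle hn
    have hlt : ty < y := by omega
    rw [PySem.List.pyRange_neg_one_cons (by omega)]
    simp only [pvLoopY, if_pos (by omega : y ≠ ty), List.map_cons]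
    have := ih (y + -1) (by omega) (by omega)
    simpa [show y + -1 - 1 = y + -1 + -1 by ring] using congrArg (List.cons (x, y + -1)) this

-- shift a unit range through an affine map (used to match B's index formula to A's coordinate ranges)
theorem map_add_pyRange (c a b : Int) :
    (PySem.List.pyRange a b 1).map (fun i => c + i) = PySem.List.pyRange (c + a) (c + b) 1 := by
  rw [PySem.List.pyRange_one, PySem.List.pyRange_one, List.map_map]
  have : (c + b - (c + a)).toNat = (b - a).toNat := by omega
  rw [this]
  exact List.map_congr_left (fun k _ => by simp; ring)

theorem map_sub_pyRange (c a b : Int) :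
    (PySem.List.pyRange a b 1).map (fun i => c - i) = PySem.List.pyRange (c - a) (c - b) (-1) := by
  rw [PySem.List.pyRange_one, PySem.List.pyRange_neg_one, List.map_map]
  have : (c - a - (c - b)).toNat = (b - a).toNat := by omega
  rw [this]
  exact List.map_congr_left (fun k _ => by simp; ring)

-- B's single range split into the two legs (the index formula specialises on each half)
theorem B_split (x0 y0 tx sx sy ax ay : Int) (hax : 0 ≤ ax) (hay : 0 ≤ ay)
    (hx : x0 + sx * ax = tx) :
    (PySem.List.pyRange 0 (ax + ay + 1) 1).map
        (fun i => (x0 + sx * min i ax, y0 + sy * max (i - ax) 0))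
      = (PySem.List.pyRange 0 (ax + 1) 1).map (fun i => (x0 + sx * i, y0))
        ++ (PySem.List.pyRange (ax + 1) (ax + ay + 1) 1).map (fun i => (tx, y0 + sy * (i - ax))) := by
  rw [PySem.List.pyRange_one_append 0 (ax + 1) (ax + ay + 1) (by omega) (by omega), List.map_append]
  congr 1
  · refine List.map_congr_left (fun i hi => ?_)
    rw [PySem.List.mem_pyRange_one] at hi
    have h1 : min i ax = i := by omega
    have h2 : max (i - ax) 0 = 0 := by omega
    rw [h1, h2, mul_zero, add_zero]
  · refine List.map_congr_left (fun i hi => ?_)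
    rw [PySem.List.mem_pyRange_one] at hi
    have h1 : min i ax = ax := by omega
    have h2 : max (i - ax) 0 = i - ax := by omega
    rw [h1, h2, hx]

theorem legX_up (x0 tx y0 ax : Int) (h : ax = tx - x0) (hax : 0 ≤ ax) :
    (PySem.List.pyRange 0 (ax + 1) 1).map (fun i => (x0 + 1 * i, y0))
      = (x0, y0) :: (PySem.List.pyRange (x0 + 1) (tx + 1) 1).map (fun a => (a, y0)) := by
  have hf : (fun i => ((x0 + 1 * i : Int), y0))
      = (fun a => ((a : Int), y0)) ∘ (fun i => x0 + i) := by funext i; simp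
  rw [hf, ← List.map_map, map_add_pyRange, add_zero,
    show x0 + (ax + 1) = tx + 1 by omega,
    PySem.List.pyRange_one_cons (by omega), List.map_cons]

theorem legX_down (x0 tx y0 ax : Int) (h : ax = x0 - tx) (hax : 0 ≤ ax) :
    (PySem.List.pyRange 0 (ax + 1) 1).map (fun i => (x0 + -1 * i, y0))
      = (x0, y0) :: (PySem.List.pyRange (x0 + -1) (tx + -1) (-1)).map (fun a => (a, y0)) := by
  have hf : (fun i => ((x0 + -1 * i : Int), y0))
      = (fun a => ((a : Int), y0)) ∘ (fun i => x0 - i) := by funext i; simp; ring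
  rw [hf, ← List.map_map, map_sub_pyRange, sub_zero,
    show x0 - (ax + 1) = tx - 1 by omega,
    PySem.List.pyRange_neg_one_cons (by omega), List.map_cons,
    show x0 - 1 = x0 + -1 by ring, show tx - 1 = tx + -1 by ring]

theorem legY_up (y0 ty tx ax ay : Int) (h : ay = ty - y0) :
    (PySem.List.pyRange (ax + 1) (ax + ay + 1) 1).map (fun i => (tx, y0 + 1 * (i - ax)))
      = (PySem.List.pyRange (y0 + 1) (ty + 1) 1).map (fun b => (tx, b)) := by
  have hf : (fun i => (tx, (y0 + 1 * (i - ax) : Int)))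
      = (fun b => (tx, (b : Int))) ∘ (fun i => (y0 - ax) + i) := by funext i; simp; ring
  rw [hf, ← List.map_map, map_add_pyRange,
    show y0 - ax + (ax + 1) = y0 + 1 by ring,
    show y0 - ax + (ax + ay + 1) = ty + 1 by omega]

theorem legY_down (y0 ty tx ax ay : Int) (h : ay = y0 - ty) :
    (PySem.List.pyRange (ax + 1) (ax + ay + 1) 1).map (fun i => (tx, y0 + -1 * (i - ax)))
      = (PySem.List.pyRange (y0 + -1) (ty + -1) (-1)).map (fun b => (tx, b)) := by
  have hf : (fun i => (tx, (y0 + -1 * (i - ax) : Int)))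
      = (fun b => (tx, (b : Int))) ∘ (fun i => (y0 + ax) - i) := by funext i; simp; ring
  rw [hf, ← List.map_map, map_sub_pyRange,
    show y0 + ax - (ax + 1) = y0 + -1 by ring,
    show y0 + ax - (ax + ay + 1) = ty + -1 by omega]

-- ===== VERDICT (by name: the statement is the Claim_ definition above) =====
theorem manhattan_path_py_spec : Claim_equal_manhattan_path_py := by
  intro start end_ _
  obtain ⟨x0, y0⟩ := start
  obtain ⟨tx, ty⟩ := end_
  unfold Spec_manhattan_path_py manhattan_path_py manhattan_path_py_alt
  by_cases hx : tx > x0 <;> by_cases hy : ty > y0 <;>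
    simp only [hx, hy, if_true, if_false] <;>
    [ (rw [B_split x0 y0 tx 1 1 _ _ (by positivity) (by positivity) (by omega),
        legX_up x0 tx y0 _ (by omega) (by omega),
        legY_up y0 ty tx _ _ (by omega),
        pvLoopX_up tx y0 _ x0 (by omega) rfl,
        pvLoopY_up ty tx _ y0 (by omega) rfl]; simp);
      (rw [B_split x0 y0 tx 1 (-1) _ _ (by positivity) (by positivity) (by omega),
        legX_up x0 tx y0 _ (by omega) (by omega),
        legY_down y0 ty tx _ _ (by omega),
        pvLoopX_up tx y0 _ x0 (by omega) rfl,
        pvLoopY_down ty tx _ y0 (by omega) rfl]; simp);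
      (rw [B_split x0 y0 tx (-1) 1 _ _ (by positivity) (by positivity) (by omega),
        legX_down x0 tx y0 _ (by omega) (by omega),
        legY_up y0 ty tx _ _ (by omega),
        pvLoopX_down tx y0 _ x0 (by omega) rfl,
        pvLoopY_up ty tx _ y0 (by omega) rfl]; simp);
      (rw [B_split x0 y0 tx (-1) (-1) _ _ (by positivity) (by positivity) (by omega),
        legX_down x0 tx y0 _ (by omega) (by omega),
        legY_down y0 ty tx _ _ (by omega),
        pvLoopX_down tx y0 _ x0 (by omega) rfl,
        pvLoopY_down ty tx _ y0 (by omega) rfl]; simp)]
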